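-- pv_equiv track=rewrite | github.com/Leftfish/Advent-of-Code-2020 | 10/d10.py | multiply_diffs_permutations
-- ===== SOURCE A (Python) =====
-- from collections import defaultdict
--
-- def tribonacci(n):
--     if 0 <= n <= 1: return 0
--     else:
--         a, b, c = 1, 1, 2
--         for _ in range(1, n-1):
--             a, b, c = b, c, a + b + c
--     return c
--
-- def multiply_diffs_permutations(diffs):
--     d = defaultdict(int)
--     buffer = []
--     product = 1
--
--     for i in range(len(diffs)):
--         if diffs[i] == 1:
--             buffer.append(diffs[i])
--         elif diffs[i] == 3:
--             if len(buffer) > 1: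
--                 d[len(buffer)] += 1
--             buffer = []
--     d[len(buffer)] += 1
--
--     for k in d:
--         multiplier = tribonacci(k)**d[k] if k > 0 else 1
--         product *= multiplier
--
--     return product
-- ===== SOURCE B (Python) =====
-- def tribonacci(n):
--     if n <= 1:
--         return 0
--     a, b, c = 1, 1, 2
--     for _ in range(n - 2):
--         a, b, c = b, c, a + b + c
--     return c
--
-- def multiply_diffs_permutations(diffs):
--     # Positions of the 3s in the kept (1/3-only) sequence; consecutive gaps are the run lengths.
--     kept = [x for x in diffs if x == 1 or x == 3]
--     bounds = [-1] + [i for i, x in enumerate(kept) if x == 3] + [len(kept)]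
--     *interior, final = [b - a - 1 for a, b in zip(bounds, bounds[1:])]
--     product = 1
--     for r in interior:
--         if r > 1:
--             product *= tribonacci(r)
--     return product * tribonacci(final) if final > 0 else product
-- ===== Notes on version B (the rewrite author's own statement) =====
-- stated objective: alternative
-- what changed: B replaces A's stateful left-to-right scan (buffer list + run-length histogram dict + second pass over the dict keys) with a position-based computation: it records the positions of the 3s in the filtered sequence, obtains every run length at once as pairwise gaps between consecutive positions (with -1 and the length as sentinels), and takes the product of tribonacci over the qualifying gaps.
import Mathlib
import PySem

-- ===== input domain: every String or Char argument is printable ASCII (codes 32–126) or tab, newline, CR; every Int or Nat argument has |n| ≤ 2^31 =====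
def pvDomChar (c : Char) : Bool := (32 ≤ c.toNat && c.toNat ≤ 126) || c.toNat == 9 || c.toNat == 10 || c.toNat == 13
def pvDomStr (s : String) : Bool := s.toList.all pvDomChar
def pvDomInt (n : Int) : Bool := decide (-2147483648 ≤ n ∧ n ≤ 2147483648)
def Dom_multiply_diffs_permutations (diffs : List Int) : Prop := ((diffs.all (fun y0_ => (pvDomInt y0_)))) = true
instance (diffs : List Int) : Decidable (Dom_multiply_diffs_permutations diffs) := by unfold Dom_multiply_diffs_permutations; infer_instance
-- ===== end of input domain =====

-- B replaces A's stateful scan (buffer + histogram dict + key pass) by a position-based computation: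
-- run lengths are pairwise gaps between consecutive positions of 3 in the filtered sequence (objective: alternative).


-- ===== PORT A =====
def tribonacci (n : Int) : Int :=
  if 0 ≤ n ∧ n ≤ 1 then 0
  else
    let s := (PySem.List.pyRange 1 (n - 1) 1).foldl
      (fun (s : Int × Int × Int) _ => (s.2.1, s.2.2, s.1 + s.2.1 + s.2.2)) (1, 1, 2)
    s.2.2

def multiply_diffs_permutations (diffs : List Int) : Int :=
  let st := (PySem.List.pyRange 0 (PySem.List.len diffs) 1).foldl
    (fun (st : PySem.Dict Int Int × List Int) i =>
      let x := PySem.List.pyGetD diffs i 0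
      if x = 1 then (st.1, st.2 ++ [x])
      else if x = 3 then
        ((if st.2.length > 1 then st.1.modify (st.2.length : Int) 0 (· + 1) else st.1), [])
      else st)
    (PySem.Dict.empty, [])
  let d := st.1.modify ((st.2.length : Int)) 0 (· + 1)
  d.keys.foldl (fun product k =>
      product * (if k > 0 then tribonacci k ^ (d.getD k 0).toNat else 1)) 1

-- ===== PORT B =====
def tribonacci_alt (n : Int) : Int :=
  if n ≤ 1 then 0
  else
    let s := (PySem.List.pyRange 0 (n - 2) 1).foldl
      (fun (s : Int × Int × Int) _ => (s.2.1, s.2.2, s.1 + s.2.1 + s.2.2)) (1, 1, 2)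
    s.2.2

def multiply_diffs_permutations_alt (diffs : List Int) : Int :=
  let kept := diffs.filter (fun x => decide (x = 1) || decide (x = 3))
  let bounds : List Int :=
    [-1] ++ ((PySem.List.enumerate kept 0).filter (fun p => decide (p.2 = 3))).map (fun p => p.1)
        ++ [PySem.List.len kept]
  -- '*interior, final = …' destructuring: the gap list always has ≥ 1 element (bounds has ≥ 2),
  -- so the getLastD default is unreachable
  let runs := (bounds.zip bounds.tail).map (fun p => p.2 - p.1 - 1)
  let interior := runs.dropLast
  let final := runs.getLastD 0
  let product := interior.foldl (fun p r => if r > 1 then p * tribonacci_alt r else p) 1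
  if final > 0 then product * tribonacci_alt final else product

-- ===== PRECONDITION & SPEC =====
def Spec_multiply_diffs_permutations (diffs : List Int) (out : Int) : Prop := out = multiply_diffs_permutations_alt diffs
instance (diffs : List Int) (out : Int) : Decidable (Spec_multiply_diffs_permutations diffs out) := by unfold Spec_multiply_diffs_permutations; infer_instance

-- ===== CLAIM (what is proved, stated in full; the proofs are below) =====
def Claim_equal_multiply_diffs_permutations : Prop := ∀ (diffs : List Int), Dom_multiply_diffs_permutations diffs → Spec_multiply_diffs_permutations diffs (multiply_diffs_permutations diffs)

-- ===== LEMMAS AND PROOFS =====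

-- the interior run lengths A records in its dict (only runs of length > 1), given current run r
def pvRecs : List Int → Nat → List Int
  | [], _ => []
  | x :: xs, r =>
    if x = 1 then pvRecs xs (r + 1)
    else if x = 3 then (if 1 < r then [(r : Int)] else []) ++ pvRecs xs 0
    else pvRecs xs r

-- the length of the buffer left at the end of A's first loop
def pvFin : List Int → Nat → Nat
  | [], r => r
  | x :: xs, r =>
    if x = 1 then pvFin xs (r + 1)
    else if x = 3 then pvFin xs 0
    else pvFin xs r

-- all segment lengths (split on 3) of a list, in order, last = trailing segment
def pvSegLens : List Int → List Int
  | [] => [0]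
  | y :: t => if y = 3 then 0 :: pvSegLens t else pvAddHead 1 (pvSegLens t)
where
  pvAddHead (d : Int) : List Int → List Int
  | [] => []
  | h :: t => (d + h) :: t

def pvGaps (l : List Int) : List Int := (l.zip l.tail).map (fun p => p.2 - p.1 - 1)

def pvPos (ys : List Int) (s : Int) : List Int :=
  ((PySem.List.enumerate ys s).filter (fun p => decide (p.2 = 3))).map (fun p => p.1)

theorem pvSegLens_ne_nil (ys : List Int) : pvSegLens ys ≠ [] := by
  induction ys with
  | nil => simp [pvSegLens]
  | cons y t ih =>
    simp only [pvSegLens]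
    split
    · simp
    · cases h : pvSegLens t with
      | nil => exact absurd h ih
      | cons a b => simp [pvSegLens.pvAddHead]

theorem pvAddHead_addHead (d e : Int) (l : List Int) :
    pvSegLens.pvAddHead d (pvSegLens.pvAddHead e l) = pvSegLens.pvAddHead (d + e) l := by
  cases l with
  | nil => rfl
  | cons h t => simp [pvSegLens.pvAddHead]; ring

theorem pvPos_cons (y : Int) (ys : List Int) (s : Int) :
    pvPos (y :: ys) s = if y = 3 then s :: pvPos ys (s + 1) else pvPos ys (s + 1) := by
  by_cases h : y = 3 <;>
    simp [pvPos, PySem.List.enumerate_cons, h]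

-- gaps of (a :: positions of 3 ++ [end]) are the segment lengths, offset by s-1-a on the head
theorem pv_gaps_pos : ∀ (ys : List Int) (s a : Int),
    pvGaps (a :: pvPos ys s ++ [s + ys.length]) = pvSegLens.pvAddHead (s - 1 - a) (pvSegLens ys) := by
  intro ys
  induction ys with
  | nil =>
    intro s a
    simp [pvPos, PySem.List.enumerate_nil, pvGaps, pvSegLens, pvSegLens.pvAddHead]
    ring
  | cons y t ih =>
    intro s a
    rw [pvPos_cons]
    by_cases h3 : y = 3
    · rw [if_pos h3]
      have hlen : s + ((y :: t).length : Int) = (s + 1) + (t.length : Int) := by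
        simp; ring
      rw [hlen]
      have hstep : pvGaps (a :: (s :: pvPos t (s + 1)) ++ [s + 1 + ↑t.length])
          = (s - a - 1) :: pvGaps (s :: pvPos t (s + 1) ++ [s + 1 + ↑t.length]) := by
        simp [pvGaps]
      rw [hstep, ih (s + 1) s]
      have h0 : (s + 1 - 1 - s) = 0 := by ring
      rw [h0]
      obtain ⟨h, tl, he⟩ : ∃ h tl, pvSegLens t = h :: tl := by
        cases hq : pvSegLens t with
        | nil => exact absurd hq (pvSegLens_ne_nil t)
        | cons a b => exact ⟨a, b, rfl⟩
      simp [pvSegLens, h3, he, pvSegLens.pvAddHead]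
      ring
    · rw [if_neg h3]
      have hlen : s + ((y :: t).length : Int) = (s + 1) + (t.length : Int) := by
        simp; ring
      rw [hlen, ih (s + 1) a]
      simp only [pvSegLens, if_neg h3]
      rw [pvAddHead_addHead]
      have harith : s + 1 - 1 - a = s - 1 - a + 1 := by ring
      rw [harith]

-- interior segments > 1 of the filtered list are exactly A's recorded runs
theorem pv_seg_recs : ∀ (xs : List Int) (r : Nat),
    (pvSegLens.pvAddHead (r : Int) (pvSegLens (xs.filter (fun x => decide (x = 1) || decide (x = 3))))).dropLast.filter
      (fun k => decide (1 < k)) = pvRecs xs r := by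
  intro xs
  induction xs with
  | nil => intro r; simp [pvSegLens, pvSegLens.pvAddHead, pvRecs]
  | cons x t ih =>
    intro r
    by_cases h1 : x = 1
    · subst h1
      have : pvSegLens ((1 :: t).filter (fun x => decide (x = 1) || decide (x = 3)))
          = pvSegLens.pvAddHead 1 (pvSegLens (t.filter (fun x => decide (x = 1) || decide (x = 3)))) := by
        simp [pvSegLens]
      rw [this, pvAddHead_addHead]
      have hc : ((r : Int) + 1) = ((r + 1 : Nat) : Int) := by push_cast; ring
      rw [hc, ih (r + 1)]
      simp [pvRecs]
    · by_cases h3 : x = 3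
      · subst h3
        have hf : (3 :: t).filter (fun x => decide (x = 1) || decide (x = 3))
            = 3 :: t.filter (fun x => decide (x = 1) || decide (x = 3)) := by
          simp
        rw [hf]
        obtain ⟨h, tl, he⟩ : ∃ h tl, pvSegLens (t.filter (fun x => decide (x = 1) || decide (x = 3))) = h :: tl := by
          cases hq : pvSegLens (t.filter (fun x => decide (x = 1) || decide (x = 3))) with
          | nil => exact absurd hq (pvSegLens_ne_nil _)
          | cons a b => exact ⟨a, b, rfl⟩
        have hB := ih 0
        rw [he] at hB
        simp only [Nat.cast_zero, pvSegLens.pvAddHead, zero_add] at hB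
        have hseg : pvSegLens ((3 : Int) :: t.filter (fun x => decide (x = 1) || decide (x = 3)))
            = 0 :: pvSegLens (t.filter (fun x => decide (x = 1) || decide (x = 3))) := by
          simp [pvSegLens]
        rw [hseg, he]
        simp only [pvSegLens.pvAddHead]
        rw [List.dropLast_cons₂, List.filter_cons]
        simp only [pvRecs, if_neg (by norm_num : ¬ (3:Int) = 1)]
        rw [← hB]
        by_cases hr : 1 < r
        · have hri : (1 : Int) < (r : Int) + 0 := by push_cast; omega
          simp [hri, hr]
        · have hri : ¬ (1 : Int) < (r : Int) + 0 := by push_cast; omega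
          simp [hri, hr]
      · have : (x :: t).filter (fun x => decide (x = 1) || decide (x = 3))
            = t.filter (fun x => decide (x = 1) || decide (x = 3)) := by
          simp [h1, h3]
        rw [this, ih r]
        simp [pvRecs, h1, h3]

-- the last segment length of the filtered list is A's final buffer length
theorem pv_seg_fin : ∀ (xs : List Int) (r : Nat),
    (pvSegLens.pvAddHead (r : Int) (pvSegLens (xs.filter (fun x => decide (x = 1) || decide (x = 3))))).getLastD 0
      = ((pvFin xs r : Nat) : Int) := by
  intro xs
  induction xs with
  | nil => intro r; simp [pvSegLens, pvSegLens.pvAddHead, pvFin]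
  | cons x t ih =>
    intro r
    by_cases h1 : x = 1
    · subst h1
      have : pvSegLens ((1 :: t).filter (fun x => decide (x = 1) || decide (x = 3)))
          = pvSegLens.pvAddHead 1 (pvSegLens (t.filter (fun x => decide (x = 1) || decide (x = 3)))) := by
        simp [pvSegLens]
      rw [this, pvAddHead_addHead]
      have hc : ((r : Int) + 1) = ((r + 1 : Nat) : Int) := by push_cast; ring
      rw [hc, ih (r + 1)]
      simp [pvFin]
    · by_cases h3 : x = 3
      · subst h3
        have hf : (3 :: t).filter (fun x => decide (x = 1) || decide (x = 3))
            = 3 :: t.filter (fun x => decide (x = 1) || decide (x = 3)) := by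
          simp
        rw [hf]
        obtain ⟨h, tl, he⟩ : ∃ h tl, pvSegLens (t.filter (fun x => decide (x = 1) || decide (x = 3))) = h :: tl := by
          cases hq : pvSegLens (t.filter (fun x => decide (x = 1) || decide (x = 3))) with
          | nil => exact absurd hq (pvSegLens_ne_nil _)
          | cons a b => exact ⟨a, b, rfl⟩
        have hB := ih 0
        rw [he] at hB
        simp only [Nat.cast_zero, pvSegLens.pvAddHead, zero_add] at hB
        have hseg : pvSegLens ((3 : Int) :: t.filter (fun x => decide (x = 1) || decide (x = 3)))
            = 0 :: pvSegLens (t.filter (fun x => decide (x = 1) || decide (x = 3))) := by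
          simp [pvSegLens]
        rw [hseg, he]
        simp only [pvSegLens.pvAddHead]
        simp only [pvFin, if_neg (by norm_num : ¬ (3:Int) = 1)]
        rw [List.getLastD_cons, List.getLastD_cons] at *
        simpa using hB
      · have : (x :: t).filter (fun x => decide (x = 1) || decide (x = 3))
            = t.filter (fun x => decide (x = 1) || decide (x = 3)) := by
          simp [h1, h3]
        rw [this, ih r]
        simp [pvFin, h1, h3]

theorem pvRecs_ge_two : ∀ (xs : List Int) (r : Nat), ∀ x ∈ pvRecs xs r, 2 ≤ x := by
  intro xs
  induction xs with
  | nil => intro r x hx; simp [pvRecs] at hx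
  | cons a as ih =>
    intro r x hx
    simp only [pvRecs] at hx
    by_cases h1 : a = 1
    · rw [if_pos h1] at hx; exact ih _ _ hx
    · rw [if_neg h1] at hx
      by_cases h3 : a = 3
      · rw [if_pos h3] at hx
        rcases List.mem_append.1 hx with h | h
        · by_cases hr : 1 < r
          · rw [if_pos hr] at h; simp at h; omega
          · rw [if_neg hr] at h; simp at h
        · exact ih _ _ h
      · rw [if_neg h3] at hx; exact ih _ _ hx

-- a fold that ignores its elements depends only on the length of the list
theorem pv_foldl_const {α β : Type} (g : β → β) :
    ∀ (l : List α) (b : β), l.foldl (fun s _ => g s) b = g^[l.length] b := by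
  intro l
  induction l with
  | nil => intro b; simp
  | cons a as ih => intro b; simp [List.foldl_cons, ih, Function.iterate_succ_apply]

theorem pv_trib_agree (n : Int) (hn : 1 ≤ n) : tribonacci n = tribonacci_alt n := by
  rcases eq_or_lt_of_le hn with h | h
  · simp [tribonacci, tribonacci_alt, ← h]
  · have h2 : ¬ (0 ≤ n ∧ n ≤ 1) := by omega
    have h2' : ¬ n ≤ 1 := by omega
    simp only [tribonacci, tribonacci_alt, h2', if_false]
    rw [pv_foldl_const, pv_foldl_const, PySem.List.length_pyRange_one, PySem.List.length_pyRange_one]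
    have he : (n - 1 - 1).toNat = (n - 2 - 0).toNat := by omega
    rw [he]
    simp

-- a multiply-accumulate fold is the product of the mapped list
theorem pv_foldl_mul {α : Type} (h : α → Int) :
    ∀ (l : List α) (p : Int), l.foldl (fun p k => p * h k) p = p * (l.map h).prod := by
  intro l
  induction l with
  | nil => intro p; simp
  | cons a as ih => intro p; simp [List.foldl_cons, ih, mul_assoc]

-- a guarded multiply fold is the product over the filtered list
theorem pv_foldl_guard : ∀ (l : List Int) (c : Int),
    l.foldl (fun p r => if r > 1 then p * tribonacci_alt r else p) c
      = c * ((l.filter (fun k => decide (1 < k))).map tribonacci_alt).prod := by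
  intro l
  induction l with
  | nil => intro c; simp
  | cons a as ih =>
    intro c
    simp only [List.foldl_cons, List.filter_cons]
    by_cases h : (1 : Int) < a
    · simp only [gt_iff_lt, if_pos h, decide_eq_true h, ih]
      simp [mul_assoc]
    · simp [h, ih]

-- characterisation of A's first loop
theorem pv_A_loop : ∀ (xs : List Int) (d : PySem.Dict Int Int) (r : Nat),
    xs.foldl (fun (st : PySem.Dict Int Int × List Int) x =>
        if x = 1 then (st.1, st.2 ++ [x])
        else if x = 3 then
          ((if st.2.length > 1 then st.1.modify (st.2.length : Int) 0 (· + 1) else st.1), [])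
        else st) (d, List.replicate r 1)
    = ((pvRecs xs r).foldl (fun d k => d.modify k 0 (· + 1)) d, List.replicate (pvFin xs r) 1) := by
  intro xs
  induction xs with
  | nil => intro d r; simp [pvRecs, pvFin]
  | cons a as ih =>
    intro d r
    simp only [List.foldl_cons]
    by_cases h1 : a = 1
    · subst h1
      rw [if_pos rfl]
      have hb : List.replicate r (1 : Int) ++ [(1 : Int)] = List.replicate (r + 1) 1 := by
        simp [List.replicate_succ']
      simp only [hb, ih]
      simp [pvRecs, pvFin]
    · rw [if_neg h1]
      by_cases h3 : a = 3
      · subst h3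
        rw [if_pos rfl]
        simp only [List.length_replicate, gt_iff_lt]
        by_cases hr : 1 < r
        · rw [if_pos hr]
          have h := ih (d.modify (r : Int) 0 (· + 1)) 0
          rw [List.replicate_zero] at h
          rw [h]
          simp [pvRecs, pvFin, hr, h1]
        · rw [if_neg hr]
          have h := ih d 0
          rw [List.replicate_zero] at h
          rw [h]
          simp [pvRecs, pvFin, hr, h1]
      · rw [if_neg h3, ih]
        simp [pvRecs, pvFin, h1, h3]

-- product over the counter's keys of f^count equals the product over the occurrence list
theorem pv_prod_counter (L : List Int) (f : Int → Int) :
    ((PySem.Set.ofList L).map (fun k => f k ^ L.count k)).prod = (L.map f).prod := by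
  rw [Finset.prod_list_map_count L f]
  rw [← List.prod_toFinset (fun k => f k ^ L.count k) (PySem.Set.nodup_ofList L)]
  apply Finset.prod_congr
  · ext x
    simp [List.mem_toFinset, PySem.Set.mem_ofList]
  · intro x _; rfl

-- ===== VERDICT (by name: the statement is the Claim_ definition above) =====
theorem multiply_diffs_permutations_spec : Claim_equal_multiply_diffs_permutations := by
  unfold Claim_equal_multiply_diffs_permutations
  intro diffs _
  unfold Spec_multiply_diffs_permutations
  unfold multiply_diffs_permutations multiply_diffs_permutations_alt
  -- A side
  rw [PySem.List.foldl_pyRange_zero_pyGetD diffs 0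
    (fun (st : PySem.Dict Int Int × List Int) x =>
      if x = 1 then (st.1, st.2 ++ [x])
      else if x = 3 then
        ((if st.2.length > 1 then st.1.modify (st.2.length : Int) 0 (· + 1) else st.1), [])
      else st) (PySem.Dict.empty, [])]
  have hA := pv_A_loop diffs PySem.Dict.empty 0
  simp only [List.replicate_zero] at hA
  rw [hA]
  set R := pvRecs diffs 0 with hR
  set F := pvFin diffs 0 with hF
  set L := R ++ [(F : Int)] with hL
  have hcnt : (R.foldl (fun d k => d.modify k 0 (· + 1)) PySem.Dict.empty).modify ((F : Int)) 0 (· + 1)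
      = PySem.Dict.counter L := by
    rw [PySem.Dict.counter_eq_foldl, hL, List.foldl_append]
    simp
  simp only [List.length_replicate]
  rw [hcnt]
  rw [pv_foldl_mul]
  have hkeys : (PySem.Dict.counter L).keys = PySem.Set.ofList L := PySem.Dict.keys_counter L
  have hmap : ((PySem.Dict.counter L).keys.map
      (fun k => if k > 0 then tribonacci k ^ ((PySem.Dict.counter L).getD k 0).toNat else 1)).prod
      = ((PySem.Set.ofList L).map (fun k => (if 0 < k then tribonacci k else 1) ^ L.count k)).prod := by
    rw [hkeys]
    apply congrArg
    apply List.map_congr_left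
    intro k hk
    have hkL : k ∈ L := (PySem.Set.mem_ofList L k).1 hk
    have hc : (PySem.Dict.counter L).getD k 0 = (L.count k : Int) := PySem.Dict.getD_counter L k
    have hc1 : 1 ≤ L.count k := List.count_pos_iff.2 hkL
    rw [hc]
    by_cases hkp : k > 0
    · simp [hkp, Int.toNat_natCast]
    · simp [hkp, one_pow]
  rw [hmap, pv_prod_counter]
  rw [hL, List.map_append, List.prod_append]
  have hRmap : R.map (fun k => if 0 < k then tribonacci k else 1) = R.map tribonacci_alt := by
    apply List.map_congr_left
    intro x hx
    have h2 : 2 ≤ x := pvRecs_ge_two diffs 0 x (by rwa [← hR])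
    rw [if_pos (by omega), pv_trib_agree x (by omega)]
  rw [hRmap]
  simp only [List.map_cons, List.map_nil, List.prod_cons, List.prod_nil, mul_one]
  -- B side: the gap list is the segment-length list of the filtered input
  have hbounds : ((-1 : Int) :: pvPos (diffs.filter (fun x => decide (x = 1) || decide (x = 3))) 0)
        ++ [(0 : Int) + ((diffs.filter (fun x => decide (x = 1) || decide (x = 3))).length : Int)]
      = [-1] ++ ((PySem.List.enumerate (diffs.filter (fun x => decide (x = 1) || decide (x = 3))) 0).filter
          (fun p => decide (p.2 = 3))).map (fun p => p.1)
        ++ [PySem.List.len (diffs.filter (fun x => decide (x = 1) || decide (x = 3)))] := by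
    simp [pvPos, PySem.List.len_eq]
  have hruns := pv_gaps_pos (diffs.filter (fun x => decide (x = 1) || decide (x = 3))) 0 (-1)
  rw [hbounds] at hruns
  have h0 : ((0 : Int) - 1 - (-1)) = ((0 : Nat) : Int) := by norm_num
  rw [h0] at hruns
  unfold pvGaps at hruns
  rw [hruns, pv_foldl_guard, pv_seg_recs, pv_seg_fin, ← hR, ← hF]
  -- final agreement
  by_cases hFp : 0 < F
  · have h1 : (0 : Int) < (F : Int) := by exact_mod_cast hFp
    rw [if_pos h1]
    simp only [gt_iff_lt, if_pos h1]
    rw [pv_trib_agree (F : Int) (by omega)]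
    ring
  · have h1 : ¬ (0 : Int) < (F : Int) := by omega
    rw [if_neg h1]
    simp only [gt_iff_lt, if_neg h1]
    ring
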